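-- pv_equiv track=rewrite | github.com/rvaughan/AdventOfCode2017 | 2021/day_03/solution_p2.py | find_co2_rating
-- ===== SOURCE A (Python) =====
-- from typing import DefaultDict
--
-- def find_co2_rating(data, c):
--     columns = DefaultDict(int)
--
--     for diag in data:
--         columns[int(diag[c])] += 1
--
--     results = []
--     if columns[0] < columns[1]:
--         for x in data:
--             if x[c] == '0':
--                 results.append(x)
--     elif columns[0] == columns[1]:
--         for x in data:
--             if x[c] == '0':
--                 results.append(x)
--     else:
--         for x in data:
--             if x[c] == '1':
--                 results.append(x)
--
--     return results
-- ===== SOURCE B (Python) =====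
-- def find_co2_rating(data, c):
--     zeros, ones = [], []
--     for x in data:
--         ch = x[c]
--         if ch == '0':
--             zeros.append(x)
--         elif ch == '1':
--             ones.append(x)
--     return zeros if len(zeros) <= len(ones) else ones
-- ===== Notes on version B (the rewrite author's own statement) =====
-- stated objective: simpler
-- what changed: One pass that partitions data into zeros/ones lists and picks the shorter-or-tied-to-zeros one, replacing A's count dictionary plus a second filtering scan with collapsed duplicate branches.
import Mathlib
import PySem

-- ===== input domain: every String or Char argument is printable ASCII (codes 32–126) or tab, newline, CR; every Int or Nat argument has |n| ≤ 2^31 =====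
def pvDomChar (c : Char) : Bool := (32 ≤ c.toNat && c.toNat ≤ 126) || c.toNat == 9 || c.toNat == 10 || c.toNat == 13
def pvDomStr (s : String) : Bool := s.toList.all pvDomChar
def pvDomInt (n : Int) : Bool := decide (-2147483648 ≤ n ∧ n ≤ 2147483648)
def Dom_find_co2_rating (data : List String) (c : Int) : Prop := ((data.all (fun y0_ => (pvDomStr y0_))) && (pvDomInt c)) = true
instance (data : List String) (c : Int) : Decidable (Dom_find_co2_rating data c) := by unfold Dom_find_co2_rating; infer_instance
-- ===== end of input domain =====

-- B replaces A's count dictionary + second filtering scan by one pass that partitions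
-- data into a zeros list and a ones list and returns zeros unless ones is strictly shorter (objective: simpler).

-- ===== PORT A =====
-- columns[int(diag[c])] += 1  (defaultdict(int)); none-branches mark where Python raises (Index/ValueError), excluded by Pre_.
def find_co2_rating (data : List String) (c : Int) : List String :=
  let columns : PySem.Dict Int Int := data.foldl (fun d diag =>
    match PySem.Str.pyGet? diag c with
    | none => d          -- IndexError in Python (outside Pre_)
    | some ch =>
      match PySem.Int.ofStr? (String.ofList [ch]) with
      | none => d        -- ValueError in Python (outside Pre_)
      | some k => d.modify k 0 (· + 1)) PySem.Dict.empty
  if columns.getD 0 0 < columns.getD 1 0 then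
    data.foldl (fun results x => if PySem.Str.pyGet? x c = some '0' then results ++ [x] else results) []
  else if columns.getD 0 0 = columns.getD 1 0 then
    data.foldl (fun results x => if PySem.Str.pyGet? x c = some '0' then results ++ [x] else results) []
  else
    data.foldl (fun results x => if PySem.Str.pyGet? x c = some '1' then results ++ [x] else results) []

-- ===== PORT B =====
def find_co2_rating_alt (data : List String) (c : Int) : List String :=
  let zo : List String × List String := data.foldl (fun zo x =>
    if PySem.Str.pyGet? x c = some '0' then (zo.1 ++ [x], zo.2)
    else if PySem.Str.pyGet? x c = some '1' then (zo.1, zo.2 ++ [x])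
    else zo) ([], [])
  if zo.1.length ≤ zo.2.length then zo.1 else zo.2

-- ===== PRECONDITION & SPEC =====
-- Pre_ excludes exactly the inputs where the Python A raises: some string has no character
-- at index c (IndexError) or that character is not a decimal digit (int() raises ValueError).
def Pre_find_co2_rating (data : List String) (c : Int) : Prop :=
  ∀ s ∈ data, (PySem.Str.pyGet? s c).any (fun ch => '0' ≤ ch && ch ≤ '9') = true
instance (data : List String) (c : Int) : Decidable (Pre_find_co2_rating data c) := by
  unfold Pre_find_co2_rating; infer_instance
def pvWitness_find_co2_rating : List String × Int := (["01", "10", "11"], 0)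

def Spec_find_co2_rating (data : List String) (c : Int) (out : List String) : Prop := out = find_co2_rating_alt data c
instance (data : List String) (c : Int) (out : List String) : Decidable (Spec_find_co2_rating data c out) := by unfold Spec_find_co2_rating; infer_instance

-- ===== CLAIM (what is proved, stated in full; the proofs are below) =====
def Claim_equal_find_co2_rating : Prop := ∀ (data : List String) (c : Int), Dom_find_co2_rating data c → Pre_find_co2_rating data c → Spec_find_co2_rating data c (find_co2_rating data c)

-- ===== LEMMAS AND PROOFS =====

-- int(str(ch)) for a digit character ch
lemma pv_ofStr_digit (ch : Char) (h0 : 48 ≤ ch.toNat) (h9 : ch.toNat ≤ 57) :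
    PySem.Int.ofStr? (String.ofList [ch]) = some ((ch.toNat : Int) - 48) := by
  have hc : Char.ofNat ch.toNat = ch := Char.ofNat_toNat ch
  interval_cases h : ch.toNat <;> rw [← hc] <;> decide

lemma pv_char_toNat_inj (a b : Char) (h : a.toNat = b.toNat) : a = b := by
  apply Char.ext
  exact UInt32.toNat_inj.mp h

-- the counting fold of port A, read at a key k0 named by digit character c0
lemma pv_cols (c : Int) (c0 : Char) (k0 : Int)
    (hc0 : 48 ≤ c0.toNat ∧ c0.toNat ≤ 57) (hk0 : k0 = (c0.toNat : Int) - 48)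
    (data : List String)
    (h : ∀ s ∈ data, (PySem.Str.pyGet? s c).any (fun ch => '0' ≤ ch && ch ≤ '9') = true)
    (d : PySem.Dict Int Int) :
    (data.foldl (fun d diag =>
      match PySem.Str.pyGet? diag c with
      | none => d
      | some ch =>
        match PySem.Int.ofStr? (String.ofList [ch]) with
        | none => d
        | some k => d.modify k 0 (· + 1)) d).getD k0 0
      = d.getD k0 0 + ((data.filter (fun x => decide (PySem.Str.pyGet? x c = some c0))).length : Int) := by
  induction data generalizing d with
  | nil => simp
  | cons s rest ih =>
    have hs := h s (List.mem_cons_self ..)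
    obtain ⟨ch, hch, hdig⟩ : ∃ ch, PySem.Str.pyGet? s c = some ch ∧ ('0' ≤ ch && ch ≤ '9') = true := by
      cases hget : PySem.Str.pyGet? s c with
      | none => rw [hget] at hs; simp at hs
      | some ch => rw [hget] at hs; exact ⟨ch, rfl, by simpa using hs⟩
    simp only [Bool.and_eq_true, decide_eq_true_eq] at hdig
    have hd0 : 48 ≤ ch.toNat := by
      have := hdig.1
      rw [Char.le_def, UInt32.le_iff_toNat_le] at this
      exact this
    have hd9 : ch.toNat ≤ 57 := by
      have := hdig.2
      rw [Char.le_def, UInt32.le_iff_toNat_le] at this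
      exact this
    have hof := pv_ofStr_digit ch hd0 hd9
    have hrest : ∀ s ∈ rest, (PySem.Str.pyGet? s c).any (fun ch => '0' ≤ ch && ch ≤ '9') = true :=
      fun t ht => h t (List.mem_cons_of_mem _ ht)
    by_cases heq : ch = c0
    · subst heq
      have hch' : PySem.List.pyGet? s.toList c = some ch := by simpa using hch
      simp only [List.foldl_cons, hch, hof, ← hk0]
      rw [ih hrest, PySem.Dict.getD_modify_self]
      simp [hch']
      omega
    · have hkne : ((ch.toNat : Int) - 48) ≠ k0 := by
        intro hk
        exact heq (pv_char_toNat_inj ch c0 (by omega))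
      have hch' : ¬ (PySem.List.pyGet? s.toList c = some c0) := by
        intro hx
        rw [show PySem.List.pyGet? s.toList c = PySem.Str.pyGet? s c from rfl, hch] at hx
        exact heq (Option.some.inj hx)
      simp only [List.foldl_cons, hch, hof]
      rw [ih hrest, PySem.Dict.getD_modify_of_ne _ _ _ (Ne.symm hkne)]
      simp [hch']

-- the partitioning fold of port B is a pair of filters
lemma pv_partition (c : Int) (data : List String) (z o : List String) :
    data.foldl (fun zo x =>
      if PySem.Str.pyGet? x c = some '0' then (zo.1 ++ [x], zo.2)
      else if PySem.Str.pyGet? x c = some '1' then (zo.1, zo.2 ++ [x])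
      else zo) (z, o)
    = (z ++ data.filter (fun x => decide (PySem.Str.pyGet? x c = some '0')),
       o ++ data.filter (fun x => decide (PySem.Str.pyGet? x c = some '1'))) := by
  induction data generalizing z o with
  | nil => simp
  | cons s rest ih =>
    simp only [List.foldl_cons]
    split_ifs with h0 h1 <;> rw [ih] <;> simp_all

-- ===== VERDICT (by name: the statement is the Claim_ definition above) =====
theorem find_co2_rating_spec : Claim_equal_find_co2_rating := by
  intro data c _ hpre
  unfold Spec_find_co2_rating find_co2_rating find_co2_rating_alt
  have h0 := pv_cols c '0' 0 (by decide) (by decide) data hpre PySem.Dict.empty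
  have h1 := pv_cols c '1' 1 (by decide) (by decide) data hpre PySem.Dict.empty
  have hp := pv_partition c data [] []
  simp only [hp]
  simp only [PySem.List.foldl_append_ite_eq_filter]
  rw [h0, h1]
  have he : (PySem.Dict.empty : PySem.Dict Int Int).getD 0 0 = 0 := by decide
  have he1 : (PySem.Dict.empty : PySem.Dict Int Int).getD 1 0 = 0 := by decide
  rw [he, he1]
  simp only [List.nil_append]
  split_ifs <;> first | rfl | omega
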